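-- pv_equiv track=rewrite | github.com/masterman331/Transparent-Classroom-Picker | shuffle_engine.py | chunk_into_classroom
-- ===== SOURCE A (Python) =====
-- def chunk_into_classroom(lst, t_rows, t_cols, seats_per_table):
--     classroom = []
--     idx = 0
--     for r in range(t_rows):
--         row_of_tables = []
--         for c in range(t_cols):
--             table = []
--             for s in range(seats_per_table):
--                 table.append(lst[idx] if idx < len(lst) else "Empty Seat")
--                 idx += 1
--             row_of_tables.append(table)
--         classroom.append(row_of_tables)
--     return classroom
-- ===== SOURCE B (Python) =====
-- def chunk_into_classroom(lst, t_rows, t_cols, seats_per_table):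
--     total = max(t_rows, 0) * max(t_cols, 0) * max(seats_per_table, 0)
--     flat = [lst[i] if i < len(lst) else "Empty Seat" for i in range(total)]
--     return [[flat[(r * t_cols + c) * seats_per_table:(r * t_cols + c + 1) * seats_per_table]
--              for c in range(t_cols)]
--             for r in range(t_rows)]
-- ===== Notes on version B (the rewrite author's own statement) =====
-- stated objective: alternative
-- what changed: Replaces the single index-threaded triple loop by a two-pass decomposition: first build a flat padded seat list, then reshape it into the classroom/table nesting with slices computed from closed-form base indices.
import Mathlib
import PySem

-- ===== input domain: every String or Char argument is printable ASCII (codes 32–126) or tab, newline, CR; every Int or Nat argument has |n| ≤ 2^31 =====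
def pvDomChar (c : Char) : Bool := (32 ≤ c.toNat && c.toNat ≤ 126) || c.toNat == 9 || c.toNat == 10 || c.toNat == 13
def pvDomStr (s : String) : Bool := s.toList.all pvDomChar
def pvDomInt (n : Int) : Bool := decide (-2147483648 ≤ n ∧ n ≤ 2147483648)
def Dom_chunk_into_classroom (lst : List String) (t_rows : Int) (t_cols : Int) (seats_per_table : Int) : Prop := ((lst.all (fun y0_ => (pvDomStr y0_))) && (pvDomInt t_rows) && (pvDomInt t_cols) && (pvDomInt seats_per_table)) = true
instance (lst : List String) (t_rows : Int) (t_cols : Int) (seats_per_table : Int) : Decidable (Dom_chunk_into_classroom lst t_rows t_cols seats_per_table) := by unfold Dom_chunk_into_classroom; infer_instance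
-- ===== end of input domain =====

-- B builds a flat padded seat list first and reshapes it with closed-form slices,
-- instead of A's single index-threaded triple loop; same result, same cost (alternative decomposition).
-- ===== PORT A =====
def chunk_into_classroom (lst : List String) (t_rows : Int) (t_cols : Int) (seats_per_table : Int) : List (List (List String)) :=
  -- classroom = []; idx = 0; triple for-loop appending, threading idx
  let res := (PySem.List.pyRange 0 t_rows 1).foldl
    (fun (st : List (List (List String)) × Int) _r =>
      let rowRes := (PySem.List.pyRange 0 t_cols 1).foldl
        (fun (st2 : List (List String) × Int) _c =>
          let tblRes := (PySem.List.pyRange 0 seats_per_table 1).foldl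
            (fun (st3 : List String × Int) _s =>
              (st3.1 ++ [if st3.2 < (lst.length : Int) then PySem.List.pyGetD lst st3.2 "Empty Seat" else "Empty Seat"],
               st3.2 + 1))
            ([], st2.2)
          (st2.1 ++ [tblRes.1], tblRes.2))
        ([], st.2)
      (st.1 ++ [rowRes.1], rowRes.2))
    ([], 0)
  res.1

-- ===== PORT B =====
def chunk_into_classroom_alt (lst : List String) (t_rows : Int) (t_cols : Int) (seats_per_table : Int) : List (List (List String)) :=
  let total := max t_rows 0 * max t_cols 0 * max seats_per_table 0
  let flat := (PySem.List.pyRange 0 total 1).map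
    (fun i => if i < (lst.length : Int) then PySem.List.pyGetD lst i "Empty Seat" else "Empty Seat")
  (PySem.List.pyRange 0 t_rows 1).map (fun r =>
    (PySem.List.pyRange 0 t_cols 1).map (fun c =>
      PySem.List.slice flat (some ((r * t_cols + c) * seats_per_table))
                           (some ((r * t_cols + c + 1) * seats_per_table))))

-- ===== PRECONDITION & SPEC =====
def Spec_chunk_into_classroom (lst : List String) (t_rows : Int) (t_cols : Int) (seats_per_table : Int) (out : List (List (List String))) : Prop := out = chunk_into_classroom_alt lst t_rows t_cols seats_per_table
instance (lst : List String) (t_rows : Int) (t_cols : Int) (seats_per_table : Int) (out : List (List (List String))) : Decidable (Spec_chunk_into_classroom lst t_rows t_cols seats_per_table out) := by unfold Spec_chunk_into_classroom; infer_instance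

-- ===== CLAIM (what is proved, stated in full; the proofs are below) =====
def Claim_equal_chunk_into_classroom : Prop := ∀ (lst : List String) (t_rows : Int) (t_cols : Int) (seats_per_table : Int), Dom_chunk_into_classroom lst t_rows t_cols seats_per_table → Spec_chunk_into_classroom lst t_rows t_cols seats_per_table (chunk_into_classroom lst t_rows t_cols seats_per_table)

-- ===== LEMMAS AND PROOFS =====

-- the seat expression shared by both Python sources
def pvSeat (lst : List String) (i : Int) : String :=
  if i < (lst.length : Int) then PySem.List.pyGetD lst i "Empty Seat" else "Empty Seat"

-- the list an append-accumulator loop produces: h idx, h (idx+d), ... (n terms)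
def pvSeq {β : Type} (h : Int → β) (d : Int) : Nat → Int → List β
  | 0, _ => []
  | n+1, idx => h idx :: pvSeq h d n (idx + d)

theorem pvSeq_eq_map {β : Type} (h : Int → β) (d : Int) :
    ∀ (n : Nat) (idx : Int), pvSeq h d n idx = (List.range n).map (fun k : Nat => h (idx + k * d)) := by
  intro n
  induction n with
  | zero => intro idx; simp [pvSeq]
  | succ m ih =>
    intro idx
    rw [pvSeq, ih, List.range_succ_eq_map]
    simp only [List.map_cons, List.map_map]
    refine List.cons_eq_cons.mpr ⟨by simp, ?_⟩
    apply List.map_congr_left; intro k _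
    simp only [Function.comp]; congr 1; push_cast; ring

-- A's loop shape: fold with state (accumulator, idx), each step appending h idx and advancing idx by d
theorem pvFoldIter {β α : Type} (h : Int → β) (d : Int) (f : List β × Int → α → List β × Int)
    (hg : ∀ acc idx a, f (acc, idx) a = (acc ++ [h idx], idx + d)) :
    ∀ (l : List α) (acc : List β) (idx : Int),
      l.foldl f (acc, idx) = (acc ++ pvSeq h d l.length idx, idx + l.length * d) := by
  intro l
  induction l with
  | nil => intro acc idx; simp [pvSeq]
  | cons a t ih =>
    intro acc idx
    rw [List.foldl_cons, hg, ih]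
    refine Prod.ext ?_ ?_
    · simp [pvSeq]
    · simp; ring

theorem pvLenRange (n : Int) : (PySem.List.pyRange 0 n 1).length = n.toNat := by
  rw [PySem.List.pyRange_one]; simp

theorem pvSliceNil (a b : Int) : PySem.List.slice ([] : List String) (some a) (some b) = [] := by
  simp [PySem.List.slice]

theorem pvTakeDropMapRange {α : Type} (g : Nat → α) (n a s : Nat) (h : a + s ≤ n) :
    (((List.range n).map g).drop a).take s = (List.range s).map (fun k => g (a + k)) := by
  apply List.ext_getElem
  · simp; omega
  · intro i h1 h2; simp

-- A's closed form: nested pvSeq with strides 1, S, C*S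
theorem pvA_closed (lst : List String) (t_rows t_cols seats_per_table : Int) :
    chunk_into_classroom lst t_rows t_cols seats_per_table =
      pvSeq (fun i2 => pvSeq (fun i1 => pvSeq (pvSeat lst) 1 seats_per_table.toNat i1)
              (seats_per_table.toNat : Int) t_cols.toNat i2)
            ((t_cols.toNat : Int) * (seats_per_table.toNat : Int)) t_rows.toNat 0 := by
  have hinner : ∀ (acc : List String) (idx : Int) (a : Int),
      (fun (st3 : List String × Int) (_s : Int) =>
        (st3.1 ++ [if st3.2 < (lst.length : Int) then PySem.List.pyGetD lst st3.2 "Empty Seat" else "Empty Seat"],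
         st3.2 + 1)) (acc, idx) a = (acc ++ [pvSeat lst idx], idx + 1) := by
    intro acc idx a; rfl
  have hmid : ∀ (acc : List (List String)) (idx : Int) (a : Int),
      (fun (st2 : List (List String) × Int) (_c : Int) =>
        let tblRes := (PySem.List.pyRange 0 seats_per_table 1).foldl
          (fun (st3 : List String × Int) _s =>
            (st3.1 ++ [if st3.2 < (lst.length : Int) then PySem.List.pyGetD lst st3.2 "Empty Seat" else "Empty Seat"],
             st3.2 + 1)) ([], st2.2)
        (st2.1 ++ [tblRes.1], tblRes.2)) (acc, idx) a
      = (acc ++ [pvSeq (pvSeat lst) 1 seats_per_table.toNat idx], idx + (seats_per_table.toNat : Int)) := by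
    intro acc idx a
    simp only []
    rw [pvFoldIter (pvSeat lst) 1 _ hinner, pvLenRange]
    simp
  have houter : ∀ (acc : List (List (List String))) (idx : Int) (a : Int),
      (fun (st : List (List (List String)) × Int) (_r : Int) =>
        let rowRes := (PySem.List.pyRange 0 t_cols 1).foldl
          (fun (st2 : List (List String) × Int) _c =>
            let tblRes := (PySem.List.pyRange 0 seats_per_table 1).foldl
              (fun (st3 : List String × Int) _s =>
                (st3.1 ++ [if st3.2 < (lst.length : Int) then PySem.List.pyGetD lst st3.2 "Empty Seat" else "Empty Seat"],
                 st3.2 + 1)) ([], st2.2)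
            (st2.1 ++ [tblRes.1], tblRes.2)) ([], st.2)
        (st.1 ++ [rowRes.1], rowRes.2)) (acc, idx) a
      = (acc ++ [pvSeq (fun i1 => pvSeq (pvSeat lst) 1 seats_per_table.toNat i1)
                   (seats_per_table.toNat : Int) t_cols.toNat idx],
         idx + (t_cols.toNat : Int) * (seats_per_table.toNat : Int)) := by
    intro acc idx a
    simp only []
    rw [pvFoldIter _ _ _ hmid, pvLenRange]
    simp
  unfold chunk_into_classroom
  simp only []
  rw [pvFoldIter _ _ _ houter, pvLenRange]
  simp

theorem pvMain (lst : List String) (t_rows t_cols seats_per_table : Int) :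
    chunk_into_classroom lst t_rows t_cols seats_per_table =
      chunk_into_classroom_alt lst t_rows t_cols seats_per_table := by
  rw [pvA_closed]
  simp only [pvSeq_eq_map]
  unfold chunk_into_classroom_alt
  simp only []
  rw [PySem.List.pyRange_one 0 t_rows, PySem.List.pyRange_one 0 t_cols,
      PySem.List.pyRange_one 0 (max t_rows 0 * max t_cols 0 * max seats_per_table 0)]
  simp only [Int.sub_zero, List.map_map, zero_add]
  apply List.map_congr_left; intro rN hr
  simp only [Function.comp]
  apply List.map_congr_left; intro cN hc
  simp only [Function.comp]
  have hrm := List.mem_range.mp hr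
  have hcm := List.mem_range.mp hc
  have hr' : (rN : Int) < t_rows := by omega
  have hc' : (cN : Int) < t_cols := by omega
  have htr : 0 < t_rows := by omega
  have htc : 0 < t_cols := by omega
  by_cases hs : seats_per_table ≤ 0
  · have hS : seats_per_table.toNat = 0 := by omega
    have htot : (max t_rows 0 * max t_cols 0 * max seats_per_table 0).toNat = 0 := by
      have h1 : max seats_per_table 0 = 0 := by omega
      rw [h1, mul_zero]
      rfl
    rw [hS, htot]
    simp [pvSliceNil]
  · rw [not_le] at hs
    rw [show max t_rows 0 * max t_cols 0 * max seats_per_table 0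
          = t_rows * t_cols * seats_per_table by rw [max_eq_left (by omega : (0:Int) ≤ t_rows),
            max_eq_left (by omega : (0:Int) ≤ t_cols), max_eq_left (by omega : (0:Int) ≤ seats_per_table)]]
    have hb1n : (0:Int) ≤ (↑rN * t_cols + ↑cN) * seats_per_table := by
      have h0 : (0:Int) ≤ ↑rN * t_cols := mul_nonneg (by positivity) (by omega)
      nlinarith
    have e2 : ((rN:Int) * t_cols + ↑cN + 1) * seats_per_table
        = (↑rN * t_cols + ↑cN) * seats_per_table + seats_per_table := by ring
    rw [e2, PySem.List.slice_toNat _ hb1n (by omega)]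
    have la : ∀ x y : Int, 0 ≤ x → 0 ≤ y → (x + y).toNat - x.toNat = y.toNat := by
      intro x y hx hy; omega
    rw [la _ _ hb1n (le_of_lt hs)]
    have hle : (↑rN * t_cols + ↑cN) * seats_per_table + seats_per_table
        ≤ t_rows * t_cols * seats_per_table := by
      nlinarith [mul_nonneg (mul_nonneg (show (0:Int) ≤ t_rows - 1 - rN by omega)
          (show (0:Int) ≤ t_cols by omega)) (le_of_lt hs),
        mul_nonneg (show (0:Int) ≤ t_cols - 1 - cN by omega) (le_of_lt hs)]
    have lb : ∀ x y z : Int, 0 ≤ x → 0 ≤ y → x + y ≤ z → x.toNat + y.toNat ≤ z.toNat := by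
      intro x y z hx hy hxyz; omega
    rw [pvTakeDropMapRange _ _ _ _ (lb _ _ _ hb1n (le_of_lt hs) hle)]
    apply List.map_congr_left; intro s hsm
    have harg : (↑(((↑rN * t_cols + ↑cN) * seats_per_table).toNat + s) : Int)
        = ↑rN * (↑t_cols.toNat * ↑seats_per_table.toNat) + ↑cN * ↑seats_per_table.toNat + ↑s * 1 := by
      push_cast [Int.toNat_of_nonneg hb1n, Int.toNat_of_nonneg (le_of_lt htc),
        Int.toNat_of_nonneg (le_of_lt hs)]
      ring
    simp only [Function.comp, pvSeat]
    rw [harg]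

-- ===== VERDICT (by name: the statement is the Claim_ definition above) =====
theorem chunk_into_classroom_spec : Claim_equal_chunk_into_classroom := by
  intro lst tr tc spt _
  unfold Spec_chunk_into_classroom
  exact pvMain lst tr tc spt
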